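-- pv_equiv track=rewrite | github.com/daniel-reich/ubiquitous-fiesta | SYmHGXX2P26xu7JFR_16.py | number_groups
-- ===== SOURCE A (Python) =====
-- def number_groups(group1, group2, group3):
--   output = []
--   for i in group1:
--     if i in group2 or i in group3:
--       output.append(i)
--   for i in group2:
--     if i in group3:
--       output.append(i)
--   return sorted(list(set(output)))
-- ===== SOURCE B (Python) =====
-- def number_groups(group1, group2, group3):
--     # Histogram approach: count, for each value, in how many groups it occurs
--     # (each group deduplicated first), and keep the values seen in >= 2 groups.
--     counts = {}
--     for v in dict.fromkeys(group1):
--         counts[v] = counts.get(v, 0) + 1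
--     for v in dict.fromkeys(group2):
--         counts[v] = counts.get(v, 0) + 1
--     for v in dict.fromkeys(group3):
--         counts[v] = counts.get(v, 0) + 1
--     return sorted(v for v, c in counts.items() if c >= 2)
-- ===== Notes on version B (the rewrite author's own statement) =====
-- stated objective: faster
-- what changed: Replaces A's quadratic membership-scanning loops with a histogram: a dict counts in how many (deduplicated) groups each value occurs, and the values with count >= 2 are sorted and returned.
import Mathlib
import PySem

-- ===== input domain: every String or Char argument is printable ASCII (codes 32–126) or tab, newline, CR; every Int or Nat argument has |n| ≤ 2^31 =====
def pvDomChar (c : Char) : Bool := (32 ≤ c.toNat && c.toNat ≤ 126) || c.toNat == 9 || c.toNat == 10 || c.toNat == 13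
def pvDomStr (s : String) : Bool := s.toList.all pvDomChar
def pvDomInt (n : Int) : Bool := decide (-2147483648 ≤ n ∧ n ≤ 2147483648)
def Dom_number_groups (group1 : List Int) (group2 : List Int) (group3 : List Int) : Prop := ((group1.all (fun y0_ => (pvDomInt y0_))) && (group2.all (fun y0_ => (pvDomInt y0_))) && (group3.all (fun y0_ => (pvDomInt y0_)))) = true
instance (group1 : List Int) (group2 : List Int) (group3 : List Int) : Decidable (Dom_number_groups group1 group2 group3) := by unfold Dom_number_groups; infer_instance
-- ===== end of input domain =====

-- B replaces A's membership-scanning loops with a histogram: a dict counts in how many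
-- (deduplicated) groups each value occurs; values with count >= 2 are sorted and returned.

-- ===== PORT A =====
def number_groups (group1 : List Int) (group2 : List Int) (group3 : List Int) : List Int :=
  -- output = []; for i in group1: if i in group2 or i in group3: output.append(i)
  let output : List Int :=
    group1.foldl (fun acc i => if group2.contains i || group3.contains i then acc ++ [i] else acc) []
  -- for i in group2: if i in group3: output.append(i)
  let output : List Int :=
    group2.foldl (fun acc i => if group3.contains i then acc ++ [i] else acc) output
  -- return sorted(list(set(output)))
  PySem.List.sorted (PySem.Set.ofList output) (fun x => x) false

-- ===== PORT B =====
def number_groups_alt (group1 : List Int) (group2 : List Int) (group3 : List Int) : List Int :=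
  -- counts = {}; for v in dict.fromkeys(groupK): counts[v] = counts.get(v, 0) + 1
  let counts : PySem.Dict Int Int :=
    (PySem.List.dedup group1).foldl (fun d v => d.modify v 0 (· + 1)) PySem.Dict.empty
  let counts : PySem.Dict Int Int :=
    (PySem.List.dedup group2).foldl (fun d v => d.modify v 0 (· + 1)) counts
  let counts : PySem.Dict Int Int :=
    (PySem.List.dedup group3).foldl (fun d v => d.modify v 0 (· + 1)) counts
  -- return sorted(v for v, c in counts.items() if c >= 2)
  PySem.List.sorted
    (counts.items.filterMap (fun p => if 2 ≤ p.2 then some p.1 else none)) (fun x => x) false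

-- ===== PRECONDITION & SPEC =====
def Spec_number_groups (group1 : List Int) (group2 : List Int) (group3 : List Int) (out : List Int) : Prop := out = number_groups_alt group1 group2 group3
instance (group1 : List Int) (group2 : List Int) (group3 : List Int) (out : List Int) : Decidable (Spec_number_groups group1 group2 group3 out) := by unfold Spec_number_groups; infer_instance

-- ===== CLAIM =====
def Claim_equal_number_groups : Prop := ∀ (group1 : List Int) (group2 : List Int) (group3 : List Int), Dom_number_groups group1 group2 group3 → Spec_number_groups group1 group2 group3 (number_groups group1 group2 group3)

-- ===== LEMMAS AND PROOFS =====

-- count in a duplicate-free list is a 0/1 indicator of membership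
theorem count_nodup_indicator {α : Type} [DecidableEq α] (l : List α) (h : l.Nodup) (x : α) :
    l.count x = if x ∈ l then 1 else 0 := by
  split_ifs with hm
  · exact List.count_eq_one_of_mem h hm
  · exact List.count_eq_zero_of_not_mem hm

-- ===== VERDICT =====
theorem number_groups_spec : Claim_equal_number_groups := by
  intro g1 g2 g3 _
  unfold Spec_number_groups number_groups number_groups_alt
  -- B's three counting folds are Counter(dedup g1 ++ dedup g2 ++ dedup g3)
  have hcnt : ∀ (L : List Int),
      L.foldl (fun d v => d.modify v 0 (· + 1)) PySem.Dict.empty = PySem.Dict.counter L :=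
    fun L => (PySem.Dict.counter_eq_foldl L).symm
  simp only [List.foldl_append.symm]
  rw [hcnt]
  set L := PySem.List.dedup g1 ++ PySem.List.dedup g2 ++ PySem.List.dedup g3 with hL
  rw [PySem.Dict.items_counter]
  refine PySem.List.sorted_eq_sorted_of_perm _ _ _ (fun a b h => h) ?_
  have hBn : (((PySem.Set.ofList L).map (fun k => (k, (L.count k : Int)))).filterMap
      (fun p => if 2 ≤ p.2 then some p.1 else none)).Nodup := by
    rw [List.filterMap_map]
    have h2 : ((fun p : Int × Int => if 2 ≤ p.2 then some p.1 else none) ∘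
        (fun k => (k, (L.count k : Int))))
        = fun k => Option.guard (fun k => 2 ≤ (L.count k : Int)) k := by
      funext k; simp [Function.comp, Option.guard]
    rw [h2, List.filterMap_eq_filter]
    exact (PySem.Set.nodup_ofList L).filter _
  refine (List.perm_ext_iff_of_nodup (PySem.Set.nodup_ofList _) hBn).2 ?_
  intro x
  -- membership in B's pre-sort list: in the union, with total (0/1-per-group) count ≥ 2
  have hmemB : x ∈ (((PySem.Set.ofList L).map (fun k => (k, (L.count k : Int)))).filterMap
      (fun p => if 2 ≤ p.2 then some p.1 else none)) ↔ x ∈ L ∧ 2 ≤ L.count x := by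
    simp only [List.mem_filterMap, List.mem_map]
    constructor
    · rintro ⟨p, ⟨k, hk, rfl⟩, hp⟩
      split_ifs at hp with h2
      · obtain rfl := Option.some.inj hp
        refine ⟨(PySem.Set.mem_ofList L k).1 hk, ?_⟩
        simp only at h2 ⊢
        exact_mod_cast h2
    · rintro ⟨hm, hc⟩
      exact ⟨(x, (L.count x : Int)), ⟨x, (PySem.Set.mem_ofList L x).2 hm, rfl⟩,
        by simp [show (2:Int) ≤ (L.count x : Int) by exact_mod_cast hc]⟩
  rw [hmemB]
  -- membership in A's pre-sort set
  have hA : x ∈ PySem.Set.ofList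
      (g2.foldl (fun acc i => if g3.contains i then acc ++ [i] else acc)
        (g1.foldl (fun acc i => if g2.contains i || g3.contains i then acc ++ [i] else acc) []))
      ↔ (x ∈ g1 ∧ (x ∈ g2 ∨ x ∈ g3)) ∨ (x ∈ g2 ∧ x ∈ g3) := by
    rw [PySem.Set.mem_ofList]
    rw [PySem.List.foldl_append_if, PySem.List.foldl_append_if]
    simp [List.mem_filter]
  rw [hA]
  -- the count in L decomposes into three 0/1 indicators of group membership
  have hd : ∀ g : List Int, (PySem.Set.ofList g).count x = if x ∈ g then 1 else 0 := by
    intro g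
    rw [count_nodup_indicator _ (PySem.Set.nodup_ofList g) x]
    simp [PySem.Set.mem_ofList]
  have hc : L.count x = (if x ∈ g1 then 1 else 0) + (if x ∈ g2 then 1 else 0)
      + (if x ∈ g3 then 1 else 0) := by
    rw [hL]
    simp only [List.count_append, PySem.List.dedup_eq_ofList, hd]
  have hmL : x ∈ L ↔ x ∈ g1 ∨ x ∈ g2 ∨ x ∈ g3 := by
    rw [hL]; simp [PySem.List.dedup_eq_ofList, PySem.Set.mem_ofList]
  rw [hmL, hc]
  by_cases h1 : x ∈ g1 <;> by_cases h2 : x ∈ g2 <;> by_cases h3 : x ∈ g3 <;>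
    simp [h1, h2, h3]
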